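-- pv_equiv track=rewrite | github.com/dpfaj2/coding-study | lv.0/d5,d6/p23.py | solution
-- ===== SOURCE A (Python) =====
-- def solution(n):
--     a=0
--     b=0
--     c=0
--     for num in range(min(6,n),1,-1):
--         if n%num == 0 and 6%num == 0:
--             a = num
--             b = 6//num
--             c = n//num
--             return (a*b*c)//6
--     if a == 0:
--         return n
-- ===== SOURCE B (Python) =====
-- from math import gcd
--
--
-- def solution(n):
--     # Closed form: the divisor scan in A finds gcd(n, 6), and the returned
--     # arithmetic simplifies to n // gcd(n, 6); for n <= 0 the scan is empty
--     # and the input is returned unchanged.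
--     if n <= 0:
--         return n
--     return n // gcd(n, 6)
-- ===== Notes on version B (the rewrite author's own statement) =====
-- stated objective: simpler
-- what changed: Replaced the descending trial-division scan over range(min(6,n),1,-1) and the a,b,c product arithmetic with the closed form n // gcd(n, 6) (Euclid's gcd), returning n unchanged on the degenerate n <= 0 inputs where the scan is empty.
import Mathlib
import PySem

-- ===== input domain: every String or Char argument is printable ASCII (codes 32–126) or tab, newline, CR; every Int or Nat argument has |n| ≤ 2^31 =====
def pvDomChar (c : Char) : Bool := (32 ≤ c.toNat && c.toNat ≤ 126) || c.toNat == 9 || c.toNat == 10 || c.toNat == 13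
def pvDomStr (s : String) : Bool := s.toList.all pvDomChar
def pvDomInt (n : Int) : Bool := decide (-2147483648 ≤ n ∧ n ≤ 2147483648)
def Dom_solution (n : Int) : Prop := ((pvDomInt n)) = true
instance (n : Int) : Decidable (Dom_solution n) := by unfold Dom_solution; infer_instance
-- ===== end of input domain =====

-- B replaces A's descending trial-division scan (and its a,b,c product arithmetic)
-- with the closed form n // gcd(n, 6); objective: simpler.

-- ===== PORT A =====
-- the for-loop: try each num of the range in order; on a hit assign a,b,c and return
def solutionLoop (n : Int) : List Int → Int
  | [] => n   -- fall-through: a is still 0 (it is only assigned on the returning branch), so `if a == 0: return n`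
  | num :: rest =>
    if PySem.Int.mod n num == 0 && PySem.Int.mod 6 num == 0 then
      -- a = num; b = 6//num; c = n//num; return (a*b*c)//6
      PySem.Int.floordiv (num * PySem.Int.floordiv 6 num * PySem.Int.floordiv n num) 6
    else solutionLoop n rest

def solution (n : Int) : Int :=
  solutionLoop n (PySem.List.pyRange (min 6 n) 1 (-1))

-- ===== PORT B =====
def solution_alt (n : Int) : Int :=
  if n ≤ 0 then n
  else PySem.Int.floordiv n (Int.gcd n 6)

-- ===== PRECONDITION & SPEC =====
def Spec_solution (n : Int) (out : Int) : Prop := out = solution_alt n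
instance (n : Int) (out : Int) : Decidable (Spec_solution n out) := by unfold Spec_solution; infer_instance

-- ===== CLAIM (what is proved, stated in full; the proofs are below) =====
def Claim_equal_solution : Prop := ∀ (n : Int), Dom_solution n → Spec_solution n (solution n)

-- ===== LEMMAS AND PROOFS =====

theorem pyRange_six : PySem.List.pyRange 6 1 (-1) = [6, 5, 4, 3, 2] := by decide

-- gcd(n, 6) only depends on n's residue mod 6
theorem gcd_six_eq (n : Int) : Int.gcd n 6 = Nat.gcd (n.natAbs % 6) 6 := by
  rw [Int.gcd_def, Nat.gcd_comm, Nat.gcd_rec]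
  norm_num

theorem solution_neg (n : Int) (h : n ≤ 0) : solution n = n := by
  unfold solution
  rw [PySem.List.pyRange_neg_one_eq_nil (by omega : min 6 n ≤ 1)]
  rfl

theorem solution_big (n : Int) (h : 6 ≤ n) :
    solution n =
      if n % 6 = 0 then n / 6
      else if n % 3 = 0 then n / 3
      else if n % 2 = 0 then n / 2
      else n := by
  unfold solution
  rw [show min 6 n = 6 from min_eq_left h, pyRange_six]
  have m6 := PySem.Int.mod_eq_emod_of_pos (a := n) (by norm_num : (0:Int) < 6)
  have m3 := PySem.Int.mod_eq_emod_of_pos (a := n) (by norm_num : (0:Int) < 3)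
  have m2 := PySem.Int.mod_eq_emod_of_pos (a := n) (by norm_num : (0:Int) < 2)
  have f6 := PySem.Int.floordiv_eq_ediv_of_pos (a := n) (by norm_num : (0:Int) < 6)
  have f3 := PySem.Int.floordiv_eq_ediv_of_pos (a := n) (by norm_num : (0:Int) < 3)
  have f2 := PySem.Int.floordiv_eq_ediv_of_pos (a := n) (by norm_num : (0:Int) < 2)
  simp only [solutionLoop, m6, m3, m2, f6, f3, f2]
  have e6 : PySem.Int.mod 6 6 = 0 := by decide
  have e5 : PySem.Int.mod 6 5 = 1 := by decide
  have e4 : PySem.Int.mod 6 4 = 2 := by decide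
  have e3 : PySem.Int.mod 6 3 = 0 := by decide
  have e2 : PySem.Int.mod 6 2 = 0 := by decide
  have d6 : PySem.Int.floordiv 6 6 = 1 := by decide
  have d3 : PySem.Int.floordiv 6 3 = 2 := by decide
  have d2 : PySem.Int.floordiv 6 2 = 3 := by decide
  simp only [e6, e5, e4, e3, e2, d6, d3, d2]
  norm_num

-- ===== VERDICT (by name: the statement is the Claim_ definition above) =====
theorem solution_spec : Claim_equal_solution := by
  intro n _
  unfold Spec_solution
  by_cases h0 : n ≤ 0
  · rw [solution_neg n h0, solution_alt, if_pos h0]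
  · by_cases h5 : n < 6
    · interval_cases n <;> decide
    · have h6 : 6 ≤ n := by omega
      rw [solution_big n h6]
      unfold solution_alt
      rw [if_neg h0]
      have hres : n.natAbs % 6 = (n % 6).toNat := by omega
      have hcase : n % 6 = 0 ∨ n % 6 = 1 ∨ n % 6 = 2 ∨ n % 6 = 3 ∨ n % 6 = 4 ∨ n % 6 = 5 := by
        omega
      rcases hcase with hr | hr | hr | hr | hr | hr
      · have hg : ((Int.gcd n 6 : Nat) : Int) = 6 := by rw [gcd_six_eq, hres, hr]; decide
        rw [hg, PySem.Int.floordiv_eq_ediv_of_pos (by norm_num : (0:Int) < 6)]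
        split_ifs
        all_goals omega
      · have hg : ((Int.gcd n 6 : Nat) : Int) = 1 := by rw [gcd_six_eq, hres, hr]; decide
        rw [hg, PySem.Int.floordiv_eq_ediv_of_pos (by norm_num : (0:Int) < 1)]
        split_ifs
        all_goals omega
      · have hg : ((Int.gcd n 6 : Nat) : Int) = 2 := by rw [gcd_six_eq, hres, hr]; decide
        rw [hg, PySem.Int.floordiv_eq_ediv_of_pos (by norm_num : (0:Int) < 2)]
        split_ifs
        all_goals omega
      · have hg : ((Int.gcd n 6 : Nat) : Int) = 3 := by rw [gcd_six_eq, hres, hr]; decide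
        rw [hg, PySem.Int.floordiv_eq_ediv_of_pos (by norm_num : (0:Int) < 3)]
        split_ifs
        all_goals omega
      · have hg : ((Int.gcd n 6 : Nat) : Int) = 2 := by rw [gcd_six_eq, hres, hr]; decide
        rw [hg, PySem.Int.floordiv_eq_ediv_of_pos (by norm_num : (0:Int) < 2)]
        split_ifs
        all_goals omega
      · have hg : ((Int.gcd n 6 : Nat) : Int) = 1 := by rw [gcd_six_eq, hres, hr]; decide
        rw [hg, PySem.Int.floordiv_eq_ediv_of_pos (by norm_num : (0:Int) < 1)]
        split_ifs
        all_goals omega
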